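-- pv_equiv track=rewrite | github.com/groom2hub/Programmers | Level_0/control_num.py | solution
-- ===== SOURCE A (Python) =====
-- def solution(n, control):
--     answer = n
--     for i in control:
--         if i == 'w':
--             answer += 1
--         elif i == 's':
--             answer -= 1
--         elif i == 'd':
--             answer += 10
--         elif i == 'a':
--             answer -= 10
--     return answer
-- ===== SOURCE B (Python) =====
-- DELTA = {'w': 1, 's': -1, 'd': 10, 'a': -10}
--
-- def solution(n, control):
--     # Divide-and-conquer: the adjustment is additive over concatenation,
--     # so split the command string in half and recurse, threading the accumulator.
--     if not control:
--         return n
--     if len(control) == 1: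
--         return n + DELTA.get(control, 0)
--     m = len(control) // 2
--     return solution(solution(n, control[:m]), control[m:])
-- ===== Notes on version B (the rewrite author's own statement) =====
-- stated objective: alternative
-- what changed: Replaced the single branching accumulator scan with divide-and-conquer recursion that splits the string in half and uses a delta lookup table at the single-character base case, relying on additivity of the adjustment over concatenation.
import Mathlib
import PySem

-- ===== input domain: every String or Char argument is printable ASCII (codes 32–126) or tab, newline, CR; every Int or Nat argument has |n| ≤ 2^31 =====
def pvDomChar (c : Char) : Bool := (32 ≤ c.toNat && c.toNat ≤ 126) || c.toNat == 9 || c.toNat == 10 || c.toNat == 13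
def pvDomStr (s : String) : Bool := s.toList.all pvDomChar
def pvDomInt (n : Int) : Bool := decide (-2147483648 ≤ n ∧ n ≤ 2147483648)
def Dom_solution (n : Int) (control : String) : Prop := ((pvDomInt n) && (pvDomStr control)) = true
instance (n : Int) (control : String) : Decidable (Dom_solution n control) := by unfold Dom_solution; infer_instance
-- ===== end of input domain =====

-- B replaces A's branching accumulator scan with divide-and-conquer recursion over string halves plus a delta lookup table (alternative, not faster).


-- ===== PORT A =====
-- for i in control: branch chain mutating answer
def solution (n : Int) (control : String) : Int :=
  control.toList.foldl
    (fun answer i =>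
      if i == 'w' then answer + 1
      else if i == 's' then answer - 1
      else if i == 'd' then answer + 10
      else if i == 'a' then answer - 10
      else answer)
    n

-- ===== PORT B =====
-- DELTA = {'w': 1, 's': -1, 'd': 10, 'a': -10}; keys are 1-char strings, looked up by the char
def deltaTable : PySem.Dict Char Int := PySem.Dict.ofList [('w', 1), ('s', -1), ('d', 10), ('a', -10)]

-- divide-and-conquer on the character list; control[:m]/control[m:] are take/drop for the
-- natural midpoint m (PySem.List.slice_to_natCast / slice_from_natCast)
def solutionGo (n : Int) (l : List Char) : Int :=
  match l with
  | [] => n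
  | [c] => n + PySem.Dict.getD deltaTable c 0
  | c1 :: c2 :: rest =>
    solutionGo (solutionGo n ((c1 :: c2 :: rest).take ((c1 :: c2 :: rest).length / 2)))
      ((c1 :: c2 :: rest).drop ((c1 :: c2 :: rest).length / 2))
termination_by l.length
decreasing_by
  · simp [List.length_take]; omega
  · simp [List.length_drop]; omega

def solution_alt (n : Int) (control : String) : Int :=
  solutionGo n control.toList

-- ===== PRECONDITION & SPEC =====
def Spec_solution (n : Int) (control : String) (out : Int) : Prop := out = solution_alt n control
instance (n : Int) (control : String) (out : Int) : Decidable (Spec_solution n control out) := by unfold Spec_solution; infer_instance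

-- ===== CLAIM (what is proved, stated in full; the proofs are below) =====
def Claim_equal_solution : Prop := ∀ (n : Int) (control : String), Dom_solution n control → Spec_solution n control (solution n control)

-- ===== LEMMAS AND PROOFS =====

-- A's loop step
def stepA (answer : Int) (i : Char) : Int :=
  if i == 'w' then answer + 1
  else if i == 's' then answer - 1
  else if i == 'd' then answer + 10
  else if i == 'a' then answer - 10
  else answer

theorem step_eq_getD (n : Int) (c : Char) :
    stepA n c = n + PySem.Dict.getD deltaTable c 0 := by
  have hd : deltaTable = PySem.Dict.mk [('w', 1), ('s', -1), ('d', 10), ('a', -10)] := by decide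
  rw [hd, PySem.Dict.getD_eq_get?_getD]
  by_cases h1 : c = 'w' <;> by_cases h2 : c = 's' <;> by_cases h3 : c = 'd' <;>
    by_cases h4 : c = 'a' <;>
    simp_all [stepA, BEq.comm, PySem.Dict.get?] <;> omega

theorem solutionGo_eq_foldl (n : Int) (l : List Char) :
    solutionGo n l = l.foldl stepA n := by
  fun_induction solutionGo n l with
  | case1 => simp
  | case2 n c => simp [step_eq_getD]
  | case3 n c1 c2 rest ih1 ih2 =>
    rw [ih2, ih1, ← List.foldl_append, List.take_append_drop]

-- ===== VERDICT (by name: the statement is the Claim_ definition above) =====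
theorem solution_spec : Claim_equal_solution := by
  intro n control _
  show solution n control = solution_alt n control
  rw [solution, solution_alt, solutionGo_eq_foldl]
  rfl
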